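-- pv_equiv track=rewrite | github.com/gmftbyGMFTBY/DIDD | domain/process_v2.py | mapping_to_domain
-- ===== SOURCE A (Python) =====
-- def mapping_to_domain(string, item):
--     string = string.lower()
--
--     mappings = {
--         'summarization': set(['post_summarization', 'text_summarization', 'note_summarization', 'airoboro2.2_summarization']),
--         'exam_question': set(['math_reasoning', 'exam_question_with_math', 'exam_question_without_math', 'solving_exam_question_without_math', 'solving_exam_question_with_math', 'airoboro2.2_cot', 'camelai_physical', 'airoboro2.2_quiz', 'camelai_chemistry', 'MetaMathQA_GSM_AnsAug', 'MetaMathQA_MATH_Rephrased', 'airoboro2.2_multiple_choice']),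
--         'rewriting': set(['text_simplification', 'language_polishing', 'instructional_rewriting', 'text_correction', 'paraphrasing', 'airoboro2.2_editor']),
--         'code': set(['code_simplification', 'code_generation', 'explaining_code', 'code_correction_rewriting', 'code_to_code_translation', 'airoboro2.2_coding', 'CodeFeedback_code_generation']),
--         'creative_writing': set(['writing_song_lyrics', 'writing_social_media_post', 'general_creative_writing', 'counterfactual', 'writing_personal_essay', 'writing_blog_post', 'writing_advertisement', 'writing_marketing_materials', 'writing_presentation_script', 'creative_writing', 'airoboro2.2_counterfactual_contextual', 'airoboro2.2_writing', 'airoboro2.2_song', 'airoboro2.2_detailed_writing']),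
--         'functional_writing': set(['writing_product_description', 'writing_news_article', 'writing_biography', 'writing_legal_document', 'writing_technical_document', 'writing_job_application', 'writing_scientific_paper', 'general_functional_writing', 'writing_cooking_recipe', 'writing_email', 'functional_writing', 'airoboro2.2_stylized_response', 'airoboro2.2_plan']),
--         'general_communication': set(['asking_how_to_question', 'seeking_advice', 'verifying_fact', 'open_question', 'analyzing_general', 'explaining_general', 'brainstorming', 'roleplay', 'planning', 'chitchat', 'recommendation', 'value_judgment', 'rejecting', 'value_judgement', 'airoboro2.2_joke']),
--         'nlp_tasks': set(['ranking', 'text_to_text_translation', 'data_analysis', 'classification_identification', 'title_generation', 'question_generation', 'reading_comprehension', 'keywords_extraction', 'information_extraction', 'topic_modeling'])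
--     }
--
--     for key, value in mappings.items():
--         if string in value:
--             return key
--     #if string in ['default', 'ultrachat', 'sharegpt', 'oasst2', 'airoboro2.2_awareness', 'airoboro2.2_misconception', 'airoboro2.2_general', 'airoboro2.2_experience', 'airoboro2.2_theory_of_mind']:
--     #    return None
--     #ipdb.set_trace()
--     return None
-- ===== SOURCE B (Python) =====
-- # Flat precomputed item->category table (no per-call dict build, no category scan).
-- _TABLE = {
--     'post_summarization': 'summarization',
--     'text_summarization': 'summarization',
--     'note_summarization': 'summarization',
--     'airoboro2.2_summarization': 'summarization',
--     'math_reasoning': 'exam_question',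
--     'exam_question_with_math': 'exam_question',
--     'exam_question_without_math': 'exam_question',
--     'solving_exam_question_without_math': 'exam_question',
--     'solving_exam_question_with_math': 'exam_question',
--     'airoboro2.2_cot': 'exam_question',
--     'camelai_physical': 'exam_question',
--     'airoboro2.2_quiz': 'exam_question',
--     'camelai_chemistry': 'exam_question',
--     'MetaMathQA_GSM_AnsAug': 'exam_question',
--     'MetaMathQA_MATH_Rephrased': 'exam_question',
--     'airoboro2.2_multiple_choice': 'exam_question',
--     'text_simplification': 'rewriting',
--     'language_polishing': 'rewriting',
--     'instructional_rewriting': 'rewriting',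
--     'text_correction': 'rewriting',
--     'paraphrasing': 'rewriting',
--     'airoboro2.2_editor': 'rewriting',
--     'code_simplification': 'code',
--     'code_generation': 'code',
--     'explaining_code': 'code',
--     'code_correction_rewriting': 'code',
--     'code_to_code_translation': 'code',
--     'airoboro2.2_coding': 'code',
--     'CodeFeedback_code_generation': 'code',
--     'writing_song_lyrics': 'creative_writing',
--     'writing_social_media_post': 'creative_writing',
--     'general_creative_writing': 'creative_writing',
--     'counterfactual': 'creative_writing',
--     'writing_personal_essay': 'creative_writing',
--     'writing_blog_post': 'creative_writing',
--     'writing_advertisement': 'creative_writing',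
--     'writing_marketing_materials': 'creative_writing',
--     'writing_presentation_script': 'creative_writing',
--     'creative_writing': 'creative_writing',
--     'airoboro2.2_counterfactual_contextual': 'creative_writing',
--     'airoboro2.2_writing': 'creative_writing',
--     'airoboro2.2_song': 'creative_writing',
--     'airoboro2.2_detailed_writing': 'creative_writing',
--     'writing_product_description': 'functional_writing',
--     'writing_news_article': 'functional_writing',
--     'writing_biography': 'functional_writing',
--     'writing_legal_document': 'functional_writing',
--     'writing_technical_document': 'functional_writing',
--     'writing_job_application': 'functional_writing',
--     'writing_scientific_paper': 'functional_writing',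
--     'general_functional_writing': 'functional_writing',
--     'writing_cooking_recipe': 'functional_writing',
--     'writing_email': 'functional_writing',
--     'functional_writing': 'functional_writing',
--     'airoboro2.2_stylized_response': 'functional_writing',
--     'airoboro2.2_plan': 'functional_writing',
--     'asking_how_to_question': 'general_communication',
--     'seeking_advice': 'general_communication',
--     'verifying_fact': 'general_communication',
--     'open_question': 'general_communication',
--     'analyzing_general': 'general_communication',
--     'explaining_general': 'general_communication',
--     'brainstorming': 'general_communication',
--     'roleplay': 'general_communication',
--     'planning': 'general_communication',
--     'chitchat': 'general_communication',
--     'recommendation': 'general_communication',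
--     'value_judgment': 'general_communication',
--     'rejecting': 'general_communication',
--     'value_judgement': 'general_communication',
--     'airoboro2.2_joke': 'general_communication',
--     'ranking': 'nlp_tasks',
--     'text_to_text_translation': 'nlp_tasks',
--     'data_analysis': 'nlp_tasks',
--     'classification_identification': 'nlp_tasks',
--     'title_generation': 'nlp_tasks',
--     'question_generation': 'nlp_tasks',
--     'reading_comprehension': 'nlp_tasks',
--     'keywords_extraction': 'nlp_tasks',
--     'information_extraction': 'nlp_tasks',
--     'topic_modeling': 'nlp_tasks',
-- }
--
-- def mapping_to_domain(string, item):
--     return _TABLE.get(string.lower())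
-- ===== Notes on version B (the rewrite author's own statement) =====
-- stated objective: faster
-- what changed: Replaces A's per-call construction of a dict of 8 sets and linear scan over them with a flat precomputed item->category dict literal and a single hash lookup (categories are disjoint, so first-match order is irrelevant).
import Mathlib
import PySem

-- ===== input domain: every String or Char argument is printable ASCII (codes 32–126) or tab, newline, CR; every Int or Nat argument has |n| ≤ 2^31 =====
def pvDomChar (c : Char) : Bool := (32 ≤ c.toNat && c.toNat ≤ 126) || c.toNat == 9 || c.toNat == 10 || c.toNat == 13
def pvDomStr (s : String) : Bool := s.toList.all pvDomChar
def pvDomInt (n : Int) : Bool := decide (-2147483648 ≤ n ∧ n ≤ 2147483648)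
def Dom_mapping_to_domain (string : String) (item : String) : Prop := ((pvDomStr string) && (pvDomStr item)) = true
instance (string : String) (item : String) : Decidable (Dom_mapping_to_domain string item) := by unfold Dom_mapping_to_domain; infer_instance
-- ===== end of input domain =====

-- B replaces A's per-call dict construction and scan over 8 category sets with one flat
-- precomputed item→category table and a single lookup (idiomatic; categories are disjoint).

-- ===== PORT A =====
-- A's 'for key, value in mappings.items(): if string in value: return key; return None'
def pvFindKey (s : String) : List (String × PySem.Set String) → Option String
  | [] => none
  | (k, v) :: rest => if PySem.Set.contains v s then some k else pvFindKey s rest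

def mapping_to_domain (string : String) (item : String) : Option String :=
  let string := PySem.Str.lower string
  let mappings : PySem.Dict String (PySem.Set String) := PySem.Dict.ofList [
    ("summarization", PySem.Set.ofList ["post_summarization", "text_summarization", "note_summarization", "airoboro2.2_summarization"]),
    ("exam_question", PySem.Set.ofList ["math_reasoning", "exam_question_with_math", "exam_question_without_math", "solving_exam_question_without_math", "solving_exam_question_with_math", "airoboro2.2_cot", "camelai_physical", "airoboro2.2_quiz", "camelai_chemistry", "MetaMathQA_GSM_AnsAug", "MetaMathQA_MATH_Rephrased", "airoboro2.2_multiple_choice"]),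
    ("rewriting", PySem.Set.ofList ["text_simplification", "language_polishing", "instructional_rewriting", "text_correction", "paraphrasing", "airoboro2.2_editor"]),
    ("code", PySem.Set.ofList ["code_simplification", "code_generation", "explaining_code", "code_correction_rewriting", "code_to_code_translation", "airoboro2.2_coding", "CodeFeedback_code_generation"]),
    ("creative_writing", PySem.Set.ofList ["writing_song_lyrics", "writing_social_media_post", "general_creative_writing", "counterfactual", "writing_personal_essay", "writing_blog_post", "writing_advertisement", "writing_marketing_materials", "writing_presentation_script", "creative_writing", "airoboro2.2_counterfactual_contextual", "airoboro2.2_writing", "airoboro2.2_song", "airoboro2.2_detailed_writing"]),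
    ("functional_writing", PySem.Set.ofList ["writing_product_description", "writing_news_article", "writing_biography", "writing_legal_document", "writing_technical_document", "writing_job_application", "writing_scientific_paper", "general_functional_writing", "writing_cooking_recipe", "writing_email", "functional_writing", "airoboro2.2_stylized_response", "airoboro2.2_plan"]),
    ("general_communication", PySem.Set.ofList ["asking_how_to_question", "seeking_advice", "verifying_fact", "open_question", "analyzing_general", "explaining_general", "brainstorming", "roleplay", "planning", "chitchat", "recommendation", "value_judgment", "rejecting", "value_judgement", "airoboro2.2_joke"]),
    ("nlp_tasks", PySem.Set.ofList ["ranking", "text_to_text_translation", "data_analysis", "classification_identification", "title_generation", "question_generation", "reading_comprehension", "keywords_extraction", "information_extraction", "topic_modeling"])]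
  pvFindKey string mappings.items

-- ===== PORT B =====
-- B's module-level flat literal dict _TABLE (item → category)
def pvTable : PySem.Dict String String := PySem.Dict.ofList [
  ("post_summarization", "summarization"),
  ("text_summarization", "summarization"),
  ("note_summarization", "summarization"),
  ("airoboro2.2_summarization", "summarization"),
  ("math_reasoning", "exam_question"),
  ("exam_question_with_math", "exam_question"),
  ("exam_question_without_math", "exam_question"),
  ("solving_exam_question_without_math", "exam_question"),
  ("solving_exam_question_with_math", "exam_question"),
  ("airoboro2.2_cot", "exam_question"),
  ("camelai_physical", "exam_question"),
  ("airoboro2.2_quiz", "exam_question"),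
  ("camelai_chemistry", "exam_question"),
  ("MetaMathQA_GSM_AnsAug", "exam_question"),
  ("MetaMathQA_MATH_Rephrased", "exam_question"),
  ("airoboro2.2_multiple_choice", "exam_question"),
  ("text_simplification", "rewriting"),
  ("language_polishing", "rewriting"),
  ("instructional_rewriting", "rewriting"),
  ("text_correction", "rewriting"),
  ("paraphrasing", "rewriting"),
  ("airoboro2.2_editor", "rewriting"),
  ("code_simplification", "code"),
  ("code_generation", "code"),
  ("explaining_code", "code"),
  ("code_correction_rewriting", "code"),
  ("code_to_code_translation", "code"),
  ("airoboro2.2_coding", "code"),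
  ("CodeFeedback_code_generation", "code"),
  ("writing_song_lyrics", "creative_writing"),
  ("writing_social_media_post", "creative_writing"),
  ("general_creative_writing", "creative_writing"),
  ("counterfactual", "creative_writing"),
  ("writing_personal_essay", "creative_writing"),
  ("writing_blog_post", "creative_writing"),
  ("writing_advertisement", "creative_writing"),
  ("writing_marketing_materials", "creative_writing"),
  ("writing_presentation_script", "creative_writing"),
  ("creative_writing", "creative_writing"),
  ("airoboro2.2_counterfactual_contextual", "creative_writing"),
  ("airoboro2.2_writing", "creative_writing"),
  ("airoboro2.2_song", "creative_writing"),
  ("airoboro2.2_detailed_writing", "creative_writing"),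
  ("writing_product_description", "functional_writing"),
  ("writing_news_article", "functional_writing"),
  ("writing_biography", "functional_writing"),
  ("writing_legal_document", "functional_writing"),
  ("writing_technical_document", "functional_writing"),
  ("writing_job_application", "functional_writing"),
  ("writing_scientific_paper", "functional_writing"),
  ("general_functional_writing", "functional_writing"),
  ("writing_cooking_recipe", "functional_writing"),
  ("writing_email", "functional_writing"),
  ("functional_writing", "functional_writing"),
  ("airoboro2.2_stylized_response", "functional_writing"),
  ("airoboro2.2_plan", "functional_writing"),
  ("asking_how_to_question", "general_communication"),
  ("seeking_advice", "general_communication"),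
  ("verifying_fact", "general_communication"),
  ("open_question", "general_communication"),
  ("analyzing_general", "general_communication"),
  ("explaining_general", "general_communication"),
  ("brainstorming", "general_communication"),
  ("roleplay", "general_communication"),
  ("planning", "general_communication"),
  ("chitchat", "general_communication"),
  ("recommendation", "general_communication"),
  ("value_judgment", "general_communication"),
  ("rejecting", "general_communication"),
  ("value_judgement", "general_communication"),
  ("airoboro2.2_joke", "general_communication"),
  ("ranking", "nlp_tasks"),
  ("text_to_text_translation", "nlp_tasks"),
  ("data_analysis", "nlp_tasks"),
  ("classification_identification", "nlp_tasks"),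
  ("title_generation", "nlp_tasks"),
  ("question_generation", "nlp_tasks"),
  ("reading_comprehension", "nlp_tasks"),
  ("keywords_extraction", "nlp_tasks"),
  ("information_extraction", "nlp_tasks"),
  ("topic_modeling", "nlp_tasks")]

def mapping_to_domain_alt (string : String) (item : String) : Option String :=
  pvTable.get? (PySem.Str.lower string)

-- ===== PRECONDITION & SPEC =====
def Spec_mapping_to_domain (string : String) (item : String) (out : Option String) : Prop := out = mapping_to_domain_alt string item
instance (string : String) (item : String) (out : Option String) : Decidable (Spec_mapping_to_domain string item out) := by unfold Spec_mapping_to_domain; infer_instance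

-- ===== CLAIM =====
def Claim_equal_mapping_to_domain : Prop := ∀ (string : String) (item : String), Dom_mapping_to_domain string item → Spec_mapping_to_domain string item (mapping_to_domain string item)

-- ===== LEMMAS AND PROOFS =====

-- one category's block inside a flat assoc dict behaves like A's membership test
theorem pv_mk_map_append (s k : String) (xs : List String) (rest : List (String × String)) :
    (PySem.Dict.mk (xs.map (fun x => (x, k)) ++ rest)).get? s
      = if xs.contains s then some k else (PySem.Dict.mk rest).get? s := by
  induction xs with
  | nil => simp
  | cons x xs ih =>
    simp only [List.map_cons, List.cons_append, PySem.Dict.get?_mk_cons, ih, List.contains_cons]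
    by_cases h : x = s
    · simp [h]
    · simp [h, Ne.symm h]

-- A's first-match scan over categories = lookup in the flattened assoc list
theorem pv_findKey_flat (s : String) (pairs : List (String × PySem.Set String)) :
    pvFindKey s pairs
      = (PySem.Dict.mk (pairs.flatMap (fun kv => kv.2.map (fun x => (x, kv.1))))).get? s := by
  induction pairs with
  | nil => simp [pvFindKey, PySem.Dict.get?]
  | cons kv rest ih =>
    simp only [pvFindKey, List.flatMap_cons, pv_mk_map_append, ih,
      PySem.Set.contains_eq_listContains]

-- the concrete category list A builds (restated for the proof)
def pvCats : List (String × PySem.Set String) := [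
    ("summarization", PySem.Set.ofList ["post_summarization", "text_summarization", "note_summarization", "airoboro2.2_summarization"]),
    ("exam_question", PySem.Set.ofList ["math_reasoning", "exam_question_with_math", "exam_question_without_math", "solving_exam_question_without_math", "solving_exam_question_with_math", "airoboro2.2_cot", "camelai_physical", "airoboro2.2_quiz", "camelai_chemistry", "MetaMathQA_GSM_AnsAug", "MetaMathQA_MATH_Rephrased", "airoboro2.2_multiple_choice"]),
    ("rewriting", PySem.Set.ofList ["text_simplification", "language_polishing", "instructional_rewriting", "text_correction", "paraphrasing", "airoboro2.2_editor"]),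
    ("code", PySem.Set.ofList ["code_simplification", "code_generation", "explaining_code", "code_correction_rewriting", "code_to_code_translation", "airoboro2.2_coding", "CodeFeedback_code_generation"]),
    ("creative_writing", PySem.Set.ofList ["writing_song_lyrics", "writing_social_media_post", "general_creative_writing", "counterfactual", "writing_personal_essay", "writing_blog_post", "writing_advertisement", "writing_marketing_materials", "writing_presentation_script", "creative_writing", "airoboro2.2_counterfactual_contextual", "airoboro2.2_writing", "airoboro2.2_song", "airoboro2.2_detailed_writing"]),
    ("functional_writing", PySem.Set.ofList ["writing_product_description", "writing_news_article", "writing_biography", "writing_legal_document", "writing_technical_document", "writing_job_application", "writing_scientific_paper", "general_functional_writing", "writing_cooking_recipe", "writing_email", "functional_writing", "airoboro2.2_stylized_response", "airoboro2.2_plan"]),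
    ("general_communication", PySem.Set.ofList ["asking_how_to_question", "seeking_advice", "verifying_fact", "open_question", "analyzing_general", "explaining_general", "brainstorming", "roleplay", "planning", "chitchat", "recommendation", "value_judgment", "rejecting", "value_judgement", "airoboro2.2_joke"]),
    ("nlp_tasks", PySem.Set.ofList ["ranking", "text_to_text_translation", "data_analysis", "classification_identification", "title_generation", "question_generation", "reading_comprehension", "keywords_extraction", "information_extraction", "topic_modeling"])]

-- A's dict has distinct keys, so its items are the literal list
set_option maxRecDepth 8192 in
theorem pv_items_eq : (PySem.Dict.ofList pvCats).items = pvCats := by decide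

-- flattening the categories gives exactly B's flat table
set_option maxRecDepth 8192 in
theorem pv_flat_eq :
    PySem.Dict.mk (pvCats.flatMap (fun kv => kv.2.map (fun x => (x, kv.1)))) = pvTable := by
  decide

-- ===== VERDICT =====
theorem mapping_to_domain_spec : Claim_equal_mapping_to_domain := by
  intro string item _
  show mapping_to_domain string item = mapping_to_domain_alt string item
  show pvFindKey (PySem.Str.lower string) (PySem.Dict.ofList pvCats).items
      = pvTable.get? (PySem.Str.lower string)
  rw [pv_items_eq, pv_findKey_flat, pv_flat_eq]
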